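-- pv_equiv track=rewrite | github.com/loopforever/skillbuilder | extractors.py | _group_imports
-- ===== SOURCE A (Python) =====
-- from typing import Dict, List, Tuple
--
-- def _group_imports(imports: List[str]) -> List[str]:
--     """Group imports by top-level package, show count if many."""
--     groups = {}  # type: Dict[str, List[str]]
--     for imp in imports:
--         clean = imp.replace("import ", "").replace("static ", "").strip()
--         top = clean.split(".")[0] if "." in clean else clean
--         groups.setdefault(top, []).append(imp)
--
--     result = []
--     for top, imps in sorted(groups.items()):
--         if len(imps) <= 3:
--             result.extend(imps)
--         else:
--             result.append(f"import {top}.* ({len(imps)} imports)")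
--     return result
-- ===== SOURCE B (Python) =====
-- from typing import List
--
--
-- def _group_imports(imports: List[str]) -> List[str]:
--     """Group imports by top-level package, show count if many.
--
--     Sort-then-scan rewrite: stable-sort the imports by their top-level key,
--     then emit each maximal run of equal keys in one left-to-right pass
--     (no dict of groups is built)."""
--
--     def key(imp: str) -> str:
--         clean = imp.replace("import ", "").replace("static ", "").strip()
--         return clean.split(".")[0] if "." in clean else clean
--
--     def emit(top: str, members: List[str]) -> List[str]:
--         if len(members) <= 3:
--             return members
--         return [f"import {top}.* ({len(members)} imports)"]
--
--     result: List[str] = []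
--     group: List[str] = []
--     for imp in sorted(imports, key=key):
--         if group and key(group[0]) != key(imp):
--             result += emit(key(group[0]), group)
--             group = []
--         group.append(imp)
--     if group:
--         result += emit(key(group[0]), group)
--     return result
-- ===== Notes on version B (the rewrite author's own statement) =====
-- stated objective: alternative
-- what changed: Replaces A's dict-of-groups accumulation plus sorted(items) with a stable sort of the imports by their top-level key followed by a single run-scan that emits each maximal equal-key group as it ends.
import Mathlib
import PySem

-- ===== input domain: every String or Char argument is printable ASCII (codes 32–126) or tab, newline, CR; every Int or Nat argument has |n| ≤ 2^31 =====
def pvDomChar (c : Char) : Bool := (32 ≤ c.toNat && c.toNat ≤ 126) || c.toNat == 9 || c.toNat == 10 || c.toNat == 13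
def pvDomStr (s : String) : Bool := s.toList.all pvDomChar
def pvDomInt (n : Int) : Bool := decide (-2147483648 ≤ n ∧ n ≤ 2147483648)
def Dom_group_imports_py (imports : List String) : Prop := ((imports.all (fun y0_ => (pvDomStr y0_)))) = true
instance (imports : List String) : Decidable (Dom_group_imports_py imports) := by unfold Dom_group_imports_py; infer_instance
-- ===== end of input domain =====

-- B replaces A's dict-of-groups + sorted(items) with a stable sort of the imports by their
-- top-level key followed by a single run-scan (alternative algorithm, same cost).

-- top-level key of one import line, as both Pythons compute it:
-- clean = imp.replace("import ", "").replace("static ", "").strip(); clean.split(".")[0] if "." in clean else clean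
def pvKey (imp : String) : String :=
  let clean := PySem.Str.strip (PySem.Str.replace (PySem.Str.replace imp "import " "") "static " "")
  if PySem.Str.isIn "." clean then
    match PySem.Str.split? clean "." with   -- sep "." ≠ "" so split? is some and nonempty: the cons arm is the one taken
    | some (p :: _) => p
    | _ => clean
  else clean

-- f"import {top}.* ({n} imports)"
def pvSummary (top : String) (n : Nat) : String :=
  "import " ++ top ++ ".* (" ++ PySem.Int.toStr (n : Int) ++ " imports)"

-- ===== PORT A =====
def group_imports_py (imports : List String) : List String :=
  let groups : PySem.Dict String (List String) :=
    imports.foldl (fun d imp => d.modify (pvKey imp) [] (fun l => l ++ [imp])) PySem.Dict.empty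
  (PySem.List.sorted2 groups.items (fun p => p.1) (fun p => p.2)).foldl
    (fun result p =>
      if p.2.length ≤ 3 then result ++ p.2
      else result ++ [pvSummary p.1 p.2.length]) []

-- ===== PORT B =====
-- B's emit(top, members)
def pvEmit (top : String) (members : List String) : List String :=
  if members.length ≤ 3 then members else [pvSummary top members.length]

-- B's loop body: flush the finished group when the key changes, then append imp
def pvStepB (st : List String × List String) (imp : String) : List String × List String :=
  match st with
  | (result, []) => (result, [imp])
  | (result, g0 :: g) =>
      if pvKey g0 ≠ pvKey imp then (result ++ pvEmit (pvKey g0) (g0 :: g), [imp])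
      else (result, (g0 :: g) ++ [imp])

def group_imports_py_alt (imports : List String) : List String :=
  match (PySem.List.sorted imports pvKey).foldl pvStepB ([], []) with
  | (result, []) => result
  | (result, g0 :: g) => result ++ pvEmit (pvKey g0) (g0 :: g)

-- ===== PRECONDITION & SPEC =====
def Spec_group_imports_py (imports : List String) (out : List String) : Prop := out = group_imports_py_alt imports
instance (imports : List String) (out : List String) : Decidable (Spec_group_imports_py imports out) := by unfold Spec_group_imports_py; infer_instance

-- ===== CLAIM (what is proved, stated in full; the proofs are below) =====
def Claim_equal_group_imports_py : Prop := ∀ (imports : List String), Dom_group_imports_py imports → Spec_group_imports_py imports (group_imports_py imports)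

-- ===== LEMMAS AND PROOFS =====

-- the sorted distinct keys and the run of each key (the common normal form of both programs)
def pvKeys (imports : List String) : List String :=
  PySem.List.sorted (PySem.Set.ofList (imports.map pvKey)) (fun k => k)

def pvRun (imports : List String) (k : String) : List String :=
  imports.filter (fun i => pvKey i == k)

def pvFinalize (st : List String × List String) : List String :=
  match st with
  | (result, []) => result
  | (result, g0 :: g) => result ++ pvEmit (pvKey g0) (g0 :: g)

theorem pv_run_key (xs : List String) (k : String) : ∀ y ∈ pvRun xs k, pvKey y = k := by
  intro y hy
  simpa using (List.mem_filter.1 hy).2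

theorem pv_run_append (xs : List String) (x : String) (k : String) :
    pvRun (xs ++ [x]) k = pvRun xs k ++ if pvKey x == k then [x] else [] := by
  simp only [pvRun, List.filter_append]
  rw [List.filter_singleton]
  cases pvKey x == k <;> rfl

-- insertBy only looks at `before x ·`
theorem pv_insertBy_congr {α : Type} (before before' : α → α → Bool) (x : α) (l : List α)
    (h : ∀ y ∈ l, before x y = before' x y) :
    PySem.List.insertBy before x l = PySem.List.insertBy before' x l := by
  induction l with
  | nil => rfl
  | cons y ys ih =>
      simp only [PySem.List.insertBy, h y (by simp)]
      split
      · rfl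
      · simpa [PySem.List.insertBy] using ih (fun z hz => h z (by simp [hz]))

theorem pv_insertBy_front {α : Type} (before : α → α → Bool) (x : α) (front back : List α)
    (h : ∀ y ∈ front, before x y = false) :
    PySem.List.insertBy before x (front ++ back) = front ++ PySem.List.insertBy before x back := by
  induction front with
  | nil => rfl
  | cons y ys ih =>
      simp only [List.cons_append, PySem.List.insertBy, h y (by simp)]
      simpa using ih (fun z hz => h z (by simp [hz]))

theorem pv_insertBy_all {α : Type} (before : α → α → Bool) (x : α) (l : List α)
    (h : ∀ y ∈ l, before x y = true) :
    PySem.List.insertBy before x l = x :: l := by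
  cases l with
  | nil => rfl
  | cons y ys => simp [PySem.List.insertBy, h y (by simp)]

-- with pairwise-distinct first components, sorted2 by (fst, snd) never consults snd
theorem pv_foldl_insert2 (ps : List (String × List String)) :
    ∀ (acc : List (String × List String)), (∀ y ∈ acc, ∀ x ∈ ps, y.1 ≠ x.1) → (ps.map Prod.fst).Nodup →
    List.foldl (fun acc x => PySem.List.insertBy
        (fun a b => decide (a.1 < b.1) || (!decide (b.1 < a.1) && decide (a.2 < b.2))) x acc) acc ps
      = List.foldl (fun acc x => PySem.List.insertBy (fun a b => decide (a.1 < b.1)) x acc) acc ps := by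
  induction ps with
  | nil => intro acc _ _; rfl
  | cons x ps ih =>
      intro acc hdisj hnd
      simp only [List.foldl_cons]
      rw [pv_insertBy_congr _ (fun a b => decide (a.1 < b.1)) x acc (by
        intro y hy
        have hne : x.1 ≠ y.1 := (hdisj y hy x (by simp)).symm
        rcases lt_trichotomy x.1 y.1 with h | h | h
        · simp [h, asymm h]
        · exact absurd h hne
        · simp [h, asymm h])]
      rw [List.map_cons] at hnd
      obtain ⟨hx, hps⟩ := List.nodup_cons.1 hnd
      apply ih
      · intro y hy z hz
        rcases (PySem.List.mem_insertBy _ x y acc).1 hy with rfl | hy'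
        · exact fun he => hx (he ▸ List.mem_map_of_mem hz)
        · exact hdisj y hy' z (by simp [hz])
      · exact hps

theorem pv_sorted2_eq_sorted_fst (ps : List (String × List String))
    (hnd : (ps.map Prod.fst).Nodup) :
    PySem.List.sorted2 ps (fun p => p.1) (fun p => p.2) = PySem.List.sorted ps (fun p => p.1) := by
  rw [PySem.List.sorted_eq_foldl_insertBy]
  have h2 : PySem.List.sorted2 ps (fun p => p.1) (fun p => p.2)
      = List.foldl (fun acc x => PySem.List.insertBy
          (fun a b => decide (a.1 < b.1) || (!decide (b.1 < a.1) && decide (a.2 < b.2))) x acc) [] ps := by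
    simp [PySem.List.sorted2]
  rw [h2]
  exact pv_foldl_insert2 ps [] (by simp) hnd

-- A's groups dict, characterized
theorem pv_groups_items (imports : List String) :
    (imports.foldl (fun d imp => d.modify (pvKey imp) [] (fun l => l ++ [imp]))
        (PySem.Dict.empty : PySem.Dict String (List String))).items
      = (PySem.Set.ofList (imports.map pvKey)).map (fun k => (k, pvRun imports k)) := by
  have hkeys : (imports.foldl (fun d imp => d.modify (pvKey imp) [] (fun l => l ++ [imp]))
      (PySem.Dict.empty : PySem.Dict String (List String))).keys
      = PySem.Set.ofList (imports.map pvKey) := by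
    rw [PySem.Dict.keys_foldl_modify_key imports pvKey [] (fun _ x => fun l => l ++ [x])]
    exact PySem.Set.update_nil_left _
  have hnd : (imports.foldl (fun d imp => d.modify (pvKey imp) [] (fun l => l ++ [imp]))
      (PySem.Dict.empty : PySem.Dict String (List String))).keys.Nodup := by
    exact PySem.Dict.nodup_keys_foldl_modify_key imports pvKey [] (fun _ x => fun l => l ++ [x]) _ (by simp)
  rw [PySem.Dict.items_eq_map_keys _ hnd [], hkeys]
  apply List.map_congr_left
  intro k hk
  have hD : (imports.foldl (fun d imp => d.modify (pvKey imp) [] (fun l => l ++ [imp]))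
      (PySem.Dict.empty : PySem.Dict String (List String))).getD k [] = pvRun imports k := by
    have := PySem.Dict.getD_foldl_modify_append (imports.map (fun i => (pvKey i, i)))
      (PySem.Dict.empty : PySem.Dict String (List String)) k
    rw [List.foldl_map] at this
    rw [this]
    simp [pvRun, Function.comp_def, List.filter_map, List.map_map]
  rw [hD]

-- A computes the concatenation of the emitted groups over the sorted keys
theorem pv_A_eq (imports : List String) :
    group_imports_py imports = (pvKeys imports).flatMap (fun k => pvEmit k (pvRun imports k)) := by
  show (List.foldl (fun result p => if p.2.length ≤ 3 then result ++ p.2 else result ++ [pvSummary p.1 p.2.length]) []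
      (PySem.List.sorted2 (List.foldl (fun d imp => d.modify (pvKey imp) [] fun l => l ++ [imp]) PySem.Dict.empty imports).items (fun p => p.1) fun p => p.2)) = _
  rw [pv_groups_items]
  have hnd : (((PySem.Set.ofList (imports.map pvKey)).map (fun k => (k, pvRun imports k))).map Prod.fst).Nodup := by
    simp [List.map_map, Function.comp_def, PySem.Set.nodup_ofList (imports.map pvKey)]
  rw [pv_sorted2_eq_sorted_fst _ hnd]
  have hsorted : PySem.List.sorted ((PySem.Set.ofList (imports.map pvKey)).map (fun k => (k, pvRun imports k))) (fun p => p.1)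
      = (pvKeys imports).map (fun k => (k, pvRun imports k)) := by
    apply PySem.List.sorted_eq_of_perm_of_pairwise_lt
    · exact (PySem.List.sorted_perm _ _ _).map _
    · rw [List.pairwise_map]
      exact PySem.List.sorted_ofList_pairwise_lt (imports.map pvKey)
  rw [hsorted, List.foldl_map]
  have hfun : (fun (result : List String) (k : String) =>
        if (pvRun imports k).length ≤ 3 then result ++ pvRun imports k
        else result ++ [pvSummary k (pvRun imports k).length])
      = fun result k => result ++ pvEmit k (pvRun imports k) := by
    funext res k
    unfold pvEmit
    split <;> rfl
  rw [hfun, PySem.List.foldl_append_eq_flatMap]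
  simp

-- stability: inserting x into the runs of strictly increasing keys, when its key already occurs
theorem pv_insert_runs_mem (x : String) (ks : List String) (rs : String → List String)
    (hpair : ks.Pairwise (· < ·)) (hkey : ∀ k ∈ ks, ∀ y ∈ rs k, pvKey y = k) (hmem : pvKey x ∈ ks) :
    PySem.List.insertBy (fun a b => decide (pvKey a < pvKey b)) x (ks.flatMap rs)
      = ks.flatMap (fun k => rs k ++ if pvKey x == k then [x] else []) := by
  induction ks with
  | nil => simp at hmem
  | cons k ks ih =>
      obtain ⟨hklt, hpair'⟩ := List.pairwise_cons.1 hpair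
      rcases List.mem_cons.1 hmem with heq | hmem'
      · -- pvKey x = k : x goes at the end of this run, runs of later keys untouched
        simp only [List.flatMap_cons]
        rw [pv_insertBy_front _ _ (rs k) _ (by
          intro y hy
          have : pvKey y = k := hkey k (by simp) y hy
          simp [this, heq])]
        rw [pv_insertBy_all _ _ _ (by
          intro y hy
          obtain ⟨k', hk', hy'⟩ := List.mem_flatMap.1 hy
          have : pvKey y = k' := hkey k' (by simp [hk']) y hy'
          simp [this, heq, hklt k' hk'])]
        have hrest : (ks.flatMap (fun k' => rs k' ++ if pvKey x == k' then [x] else []))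
            = ks.flatMap rs := by
          apply List.flatMap_congr
          intro k' hk'
          have : pvKey x ≠ k' := by
            intro he
            exact absurd (he ▸ heq ▸ hklt k' hk') (lt_irrefl _)
          simp [this]
        rw [hrest, if_pos (by simp [heq])]
        simp
      · -- k < pvKey x : skip this run
        have hkx : k < pvKey x := hklt _ hmem'
        simp only [List.flatMap_cons]
        rw [pv_insertBy_front _ _ (rs k) _ (by
          intro y hy
          have hyk : pvKey y = k := hkey k (by simp) y hy
          rw [hyk]
          exact decide_eq_false (not_lt_of_gt hkx))]
        have hne : (pvKey x == k) = false := by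
          simp; intro he; exact absurd (he ▸ hkx) (lt_irrefl _)
        rw [ih hpair' (fun k' hk' => hkey k' (by simp [hk'])) hmem']
        simp [hne]

-- stability: inserting x whose key is new inserts a fresh singleton run at its sorted place
theorem pv_insert_runs_fresh (x : String) (ks : List String) (rs : String → List String)
    (hpair : ks.Pairwise (· < ·)) (hkey : ∀ k ∈ ks, ∀ y ∈ rs k, pvKey y = k) (hmem : pvKey x ∉ ks)
    (hfresh : rs (pvKey x) = []) :
    PySem.List.insertBy (fun a b => decide (pvKey a < pvKey b)) x (ks.flatMap rs)
      = (PySem.List.insertBy (fun a b => decide (a < b)) (pvKey x) ks).flatMap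
          (fun k => rs k ++ if pvKey x == k then [x] else []) := by
  induction ks with
  | nil => simp [PySem.List.insertBy, hfresh]
  | cons k ks ih =>
      obtain ⟨hklt, hpair'⟩ := List.pairwise_cons.1 hpair
      have hne : pvKey x ≠ k := fun he => hmem (by simp [he])
      rcases lt_or_gt_of_ne hne with hlt | hgt
      · -- pvKey x < k : x lands in front of everything
        rw [pv_insertBy_all _ _ _ (by
          intro y hy
          obtain ⟨k', hk', hy'⟩ := List.mem_flatMap.1 hy
          have hyk : pvKey y = k' := hkey k' hk' y hy'
          rw [hyk]
          rcases List.mem_cons.1 hk' with rfl | hk'' <;>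
            [exact decide_eq_true hlt; exact decide_eq_true (hlt.trans (hklt _ hk''))])]
        rw [show PySem.List.insertBy (fun a b => decide (a < b)) (pvKey x) (k :: ks) = pvKey x :: k :: ks by
          simp [PySem.List.insertBy, hlt]]
        have hrest : ((k :: ks).flatMap (fun k' => rs k' ++ if pvKey x == k' then [x] else []))
            = (k :: ks).flatMap rs := by
          apply List.flatMap_congr
          intro k' hk'
          have : (pvKey x == k') = false := by
            simp
            rintro rfl
            exact hmem hk'
          simp [this]
        conv_rhs => rw [List.flatMap_cons]
        rw [hrest]
        simp [hfresh]
      · -- k < pvKey x : skip this run and this key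
        simp only [List.flatMap_cons]
        rw [pv_insertBy_front _ _ (rs k) _ (by
          intro y hy
          have hyk : pvKey y = k := hkey k (by simp) y hy
          rw [hyk]
          exact decide_eq_false (not_lt_of_gt hgt))]
        rw [show PySem.List.insertBy (fun a b => decide (a < b)) (pvKey x) (k :: ks)
              = k :: PySem.List.insertBy (fun a b => decide (a < b)) (pvKey x) ks by
          simp [PySem.List.insertBy, not_lt_of_gt hgt]]
        rw [ih hpair' (fun k' hk' => hkey k' (by simp [hk'])) (fun h => hmem (by simp [h]))]
        simp
        exact hne

-- the stable sort by key is the concatenation of the runs over the sorted distinct keys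
theorem pv_stable (imports : List String) :
    PySem.List.sorted imports pvKey = (pvKeys imports).flatMap (pvRun imports) := by
  induction imports using List.reverseRecOn with
  | nil => simp [pvKeys, PySem.List.sorted, PySem.Set.ofList]
  | append_singleton xs x ih =>
      have hsx : PySem.List.sorted (xs ++ [x]) pvKey
          = PySem.List.insertBy (fun a b => decide (pvKey a < pvKey b)) x (PySem.List.sorted xs pvKey) := by
        rw [PySem.List.sorted_eq_foldl_insertBy, PySem.List.sorted_eq_foldl_insertBy, List.foldl_append]
        rfl
      have hpair := PySem.List.sorted_ofList_pairwise_lt (xs.map pvKey)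
      have hkey : ∀ k ∈ pvKeys xs, ∀ y ∈ pvRun xs k, pvKey y = k := fun k _ => pv_run_key xs k
      have hrun : ∀ k, pvRun (xs ++ [x]) k = pvRun xs k ++ if pvKey x == k then [x] else [] :=
        pv_run_append xs x
      rw [hsx, ih]
      by_cases hmem : pvKey x ∈ xs.map pvKey
      · have hkeys : pvKeys (xs ++ [x]) = pvKeys xs := by
          simp only [pvKeys, List.map_append, List.map_cons, List.map_nil,
            PySem.Set.ofList_append_singleton]
          rw [PySem.Set.add_of_mem ((PySem.Set.mem_ofList _ _).2 hmem)]
        rw [hkeys]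
        rw [pv_insert_runs_mem x (pvKeys xs) (pvRun xs) hpair hkey
          (by rw [pvKeys, PySem.List.mem_sorted, PySem.Set.mem_ofList]; exact hmem)]
        exact (List.flatMap_congr (fun k _ => (hrun k).symm))
      · have hkeys : pvKeys (xs ++ [x])
            = PySem.List.insertBy (fun a b => decide (a < b)) (pvKey x) (pvKeys xs) := by
          simp only [pvKeys, List.map_append, List.map_cons, List.map_nil,
            PySem.Set.ofList_append_singleton]
          rw [PySem.Set.add_of_not_mem (fun h => hmem ((PySem.Set.mem_ofList _ _).1 h))]
          rw [PySem.List.sorted_eq_foldl_insertBy, PySem.List.sorted_eq_foldl_insertBy, List.foldl_append]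
          rfl
        rw [hkeys]
        rw [pv_insert_runs_fresh x (pvKeys xs) (pvRun xs) hpair hkey
          (by rw [pvKeys, PySem.List.mem_sorted, PySem.Set.mem_ofList]; exact hmem)
          (by simp only [pvRun, List.filter_eq_nil_iff]; intro a ha; simp; intro h; exact hmem (h ▸ List.mem_map_of_mem ha))]
        exact (List.flatMap_congr (fun k _ => (hrun k).symm))

-- B's loop keeps accumulating while the key does not change
theorem pv_run_scan (k : String) (r : List String) (hr : ∀ y ∈ r, pvKey y = k) :
    ∀ (g : List String), g ≠ [] → (∀ y ∈ g, pvKey y = k) →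
      ∀ (res : List String), List.foldl pvStepB (res, g) r = (res, g ++ r) := by
  induction r with
  | nil => intro g _ _ res; simp
  | cons y r ih =>
      intro g hg hgk res
      obtain ⟨g0, g', rfl⟩ : ∃ g0 g', g = g0 :: g' := by
        cases g with | nil => exact absurd rfl hg | cons a b => exact ⟨a, b, rfl⟩
      have h0 : pvKey g0 = k := hgk g0 (by simp)
      have hy : pvKey y = k := hr y (by simp)
      simp only [List.foldl_cons, pvStepB, h0, hy, ne_eq, not_true_eq_false, if_false]
      rw [ih (fun z hz => hr z (by simp [hz])) _ (by simp) (by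
        intro z hz
        rcases List.mem_append.1 hz with hz' | hz'
        · exact hgk z hz'
        · simp at hz'; exact hz' ▸ hy) res]
      simp

-- B's loop over the remaining runs, with a nonempty current group of a strictly smaller key
theorem pv_chain (ks : List String) (rs : String → List String) :
    ks.Pairwise (· < ·) → (∀ k ∈ ks, rs k ≠ []) → (∀ k ∈ ks, ∀ y ∈ rs k, pvKey y = k) →
    ∀ (res g : List String) (k0 : String), g ≠ [] → (∀ y ∈ g, pvKey y = k0) → (∀ k ∈ ks, k0 < k) →
      pvFinalize (List.foldl pvStepB (res, g) (ks.flatMap rs))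
        = res ++ pvEmit k0 g ++ ks.flatMap (fun k => pvEmit k (rs k)) := by
  induction ks with
  | nil =>
      intro _ _ _ res g k0 hg hgk _
      obtain ⟨g0, g', rfl⟩ : ∃ g0 g', g = g0 :: g' := by
        cases g with | nil => exact absurd rfl hg | cons a b => exact ⟨a, b, rfl⟩
      simp [pvFinalize, hgk g0 (by simp)]
  | cons k ks ih =>
      intro hpair hne hkey res g k0 hg hgk hlt
      obtain ⟨g0, g', rfl⟩ : ∃ g0 g', g = g0 :: g' := by
        cases g with | nil => exact absurd rfl hg | cons a b => exact ⟨a, b, rfl⟩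
      obtain ⟨m, m', hm⟩ : ∃ m m', rs k = m :: m' := by
        cases hmm : rs k with
        | nil => exact absurd hmm (hne k (by simp))
        | cons a b => exact ⟨a, b, rfl⟩
      obtain ⟨hklt, hpair'⟩ := List.pairwise_cons.1 hpair
      have h0 : pvKey g0 = k0 := hgk g0 (by simp)
      have hmk : pvKey m = k := hkey k (by simp) m (by simp [hm])
      have hk0k : k0 ≠ k := ne_of_lt (hlt k (by simp))
      simp only [List.flatMap_cons, hm, List.cons_append, List.foldl_cons]
      have hstep : pvStepB (res, g0 :: g') m = (res ++ pvEmit k0 (g0 :: g'), [m]) := by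
        simp [pvStepB, h0, hmk, hk0k]
      rw [hstep, List.foldl_append]
      rw [pv_run_scan k m' (fun z hz => hkey k (by simp) z (by simp [hm, hz])) [m] (by simp)
        (by intro z hz; simp at hz; exact hz ▸ hmk) _]
      rw [show ([m] : List String) ++ m' = rs k by simp [hm]]
      rw [ih hpair' (fun k' hk' => hne k' (by simp [hk'])) (fun k' hk' => hkey k' (by simp [hk']))
        _ (rs k) k (by simp [hm]) (hkey k (by simp)) hklt]
      simp
      rw [hm]

theorem pv_B_eq (imports : List String) :
    group_imports_py_alt imports = (pvKeys imports).flatMap (fun k => pvEmit k (pvRun imports k)) := by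
  have hB : group_imports_py_alt imports
      = pvFinalize ((PySem.List.sorted imports pvKey).foldl pvStepB ([], [])) := rfl
  rw [hB, pv_stable]
  have hpair := PySem.List.sorted_ofList_pairwise_lt (imports.map pvKey)
  cases hks : pvKeys imports with
  | nil => simp [pvFinalize]
  | cons k ks =>
      have hpair' : (k :: ks).Pairwise (· < ·) := hks ▸ hpair
      have hne : ∀ k' ∈ k :: ks, pvRun imports k' ≠ [] := by
        intro k' hk'
        have : k' ∈ imports.map pvKey := by
          have := hks ▸ hk'
          rwa [pvKeys, PySem.List.mem_sorted, PySem.Set.mem_ofList] at this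
        obtain ⟨i, hi, rfl⟩ := List.mem_map.1 this
        simp only [pvRun, ne_eq, List.filter_eq_nil_iff]
        intro h
        exact h i hi (by simp)
      have hkey : ∀ k' ∈ k :: ks, ∀ y ∈ pvRun imports k', pvKey y = k' :=
        fun k' _ => pv_run_key imports k'
      obtain ⟨m, m', hm⟩ : ∃ m m', pvRun imports k = m :: m' := by
        cases hmm : pvRun imports k with
        | nil => exact absurd hmm (hne k (by simp))
        | cons a b => exact ⟨a, b, rfl⟩
      obtain ⟨hklt, hpair''⟩ := List.pairwise_cons.1 hpair'
      have hmk : pvKey m = k := pv_run_key imports k m (by simp [hm])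
      simp only [List.flatMap_cons, hm, List.cons_append, List.foldl_cons]
      have hstep : pvStepB (([] : List String), ([] : List String)) m = ([], [m]) := rfl
      rw [hstep, List.foldl_append]
      rw [pv_run_scan k m' (fun z hz => pv_run_key imports k z (by simp [hm, hz])) [m] (by simp)
        (by intro z hz; simp at hz; exact hz ▸ hmk) _]
      rw [show ([m] : List String) ++ m' = pvRun imports k by simp [hm]]
      cases ks with
      | nil =>
          simp only [List.flatMap_nil, List.foldl_nil]
          obtain ⟨r0, r', hr⟩ : ∃ r0 r', pvRun imports k = r0 :: r' := ⟨m, m', hm⟩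
          simp [pvFinalize, hr, pv_run_key imports k r0 (by simp [hr])]
          rw [← hr, hm]
      | cons k2 ks2 =>
          rw [pv_chain (k2 :: ks2) (pvRun imports) hpair''
            (fun k' hk' => hne k' (by simp [hk'])) (fun k' hk' => hkey k' (by simp [hk']))
            [] (pvRun imports k) k (by simp [hm]) (pv_run_key imports k) hklt]
          simp
          rw [hm]

-- ===== VERDICT (by name: the statement is the Claim_ definition above) =====
theorem group_imports_py_spec : Claim_equal_group_imports_py := by
  intro imports _
  unfold Spec_group_imports_py
  rw [pv_A_eq, pv_B_eq]
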